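-- pv_equiv track=rewrite | github.com/Rubal0990/GFG-DSA | Satisfy the equation - GFG/satisfy-the-equation.py | satisfyEqn
-- ===== SOURCE A (Python) =====
-- def satisfyEqn(A, N):
--     for i in range(0, N):
--         for j in range(0, N):
--             for k in range(0, N):
--                 for l in range(0, N):
--                     if A[i]+A[j]==A[k]+A[l] and i != j and k!=l and j!=k and i != k and j!=l and i!=l:
--                         return(i,j,k,l)
--
--     return(-1,-1,-1,-1)
-- ===== SOURCE B (Python) =====
-- def satisfyEqn(A, N):
--     # Index every position by its value once (O(N)); then for (i,j,k) in lex
--     # order the needed l satisfies A[l] == A[i]+A[j]-A[k], so only the (short)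
--     # index bucket of that value is scanned instead of A's innermost O(N) loop.
--     idx = {}
--     for t in range(N):
--         idx.setdefault(A[t], []).append(t)
--     for i in range(N):
--         for j in range(N):
--             if i != j:
--                 s = A[i] + A[j]
--                 for k in range(N):
--                     if k != i and k != j:
--                         for l in idx.get(s - A[k], []):
--                             if l != i and l != j and l != k:
--                                 return (i, j, k, l)
--     return (-1, -1, -1, -1)
-- ===== Notes on version B (the rewrite author's own statement) =====
-- stated objective: faster
-- what changed: B builds a value-to-indices dictionary once and, for each (i,j,k) in lex order, scans only the bucket of the single value A[i]+A[j]-A[k] that can complete the quadruple, replacing A's innermost O(N) scan by a hash lookup plus an at-most-4-step bucket scan.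
import Mathlib
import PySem

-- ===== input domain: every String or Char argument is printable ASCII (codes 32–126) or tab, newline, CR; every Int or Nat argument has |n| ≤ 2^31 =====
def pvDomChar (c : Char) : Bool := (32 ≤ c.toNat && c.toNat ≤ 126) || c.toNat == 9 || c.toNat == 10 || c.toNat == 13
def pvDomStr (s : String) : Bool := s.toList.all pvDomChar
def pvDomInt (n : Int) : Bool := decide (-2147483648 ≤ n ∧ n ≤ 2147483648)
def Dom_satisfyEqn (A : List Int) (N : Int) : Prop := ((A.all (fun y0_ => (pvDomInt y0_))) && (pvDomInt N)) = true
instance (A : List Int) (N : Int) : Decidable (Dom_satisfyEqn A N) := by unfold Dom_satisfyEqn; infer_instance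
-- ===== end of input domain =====

-- B replaces A's two innermost loops by a value→indices dictionary built once, scanning only the bucket of the one value that can complete the quadruple (measurably faster).


-- ===== PORT A =====
-- the loop body's condition, exactly Python's `A[i]+A[j]==A[k]+A[l] and i != j and k!=l and j!=k and i != k and j!=l and i!=l`
def pvCond (A : List Int) (i j k l : Int) : Bool :=
  (PySem.List.pyGetD A i 0 + PySem.List.pyGetD A j 0 == PySem.List.pyGetD A k 0 + PySem.List.pyGetD A l 0)
    && i != j && k != l && j != k && i != k && j != l && i != l

def satisfyEqn (A : List Int) (N : Int) : List Int :=
  let r := PySem.List.pyRange 0 N 1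
  match r.findSome? (fun i => r.findSome? (fun j => r.findSome? (fun k => r.findSome? (fun l =>
      if pvCond A i j k l then some [i, j, k, l] else none)))) with
  | some out => out
  | none => [-1, -1, -1, -1]

-- ===== PORT B =====
def satisfyEqn_alt (A : List Int) (N : Int) : List Int :=
  let r := PySem.List.pyRange 0 N 1
  -- idx.setdefault(A[t], []).append(t)
  let idx := r.foldl (fun d t => d.modify (PySem.List.pyGetD A t 0) [] (fun b => b ++ [t]))
      (PySem.Dict.empty : PySem.Dict Int (List Int))
  match r.findSome? (fun i => r.findSome? (fun j =>
      if i != j then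
        let s := PySem.List.pyGetD A i 0 + PySem.List.pyGetD A j 0
        r.findSome? (fun k =>
          if k != i && k != j then
            ((idx.getD (s - PySem.List.pyGetD A k 0) []).find?
                (fun l => l != i && l != j && l != k)).map (fun l => [i, j, k, l])
          else none)
      else none)) with
  | some out => out
  | none => [-1, -1, -1, -1]

-- ===== PRECONDITION & SPEC =====
-- Python A indexes A[l] for every l < N before any return can fire, so it raises IndexError whenever N > len(A); Pre_ is exactly where A returns.
def Pre_satisfyEqn (A : List Int) (N : Int) : Prop := N ≤ (A.length : Int)
instance (A : List Int) (N : Int) : Decidable (Pre_satisfyEqn A N) := by unfold Pre_satisfyEqn; infer_instance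
def pvWitness_satisfyEqn : List Int × Int := ([1, 2, 3, 0], 4)

def Spec_satisfyEqn (A : List Int) (N : Int) (out : List Int) : Prop := out = satisfyEqn_alt A N
instance (A : List Int) (N : Int) (out : List Int) : Decidable (Spec_satisfyEqn A N out) := by unfold Spec_satisfyEqn; infer_instance

-- ===== CLAIM (what is proved, stated in full; the proofs are below) =====
def Claim_equal_satisfyEqn : Prop := ∀ (A : List Int) (N : Int), Dom_satisfyEqn A N → Pre_satisfyEqn A N → Spec_satisfyEqn A N (satisfyEqn A N)

-- ===== LEMMAS AND PROOFS =====

-- generic list lemmas ------------------------------------------------------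

theorem pv_findSome?_congr {α β : Type} (L : List α) (f g : α → Option β)
    (h : ∀ x ∈ L, f x = g x) : L.findSome? f = L.findSome? g := by
  induction L with
  | nil => rfl
  | cons a t ih =>
    simp only [List.findSome?_cons, h a (by simp)]
    cases g a with
    | some v => rfl
    | none => exact ih (fun x hx => h x (by simp [hx]))

theorem pv_find?_map_eq_findSome? {γ β : Type} (c : γ → Bool) (f : γ → β) :
    ∀ L : List γ, (L.find? c).map f = L.findSome? (fun x => if c x then some (f x) else none) := by
  intro L
  induction L with
  | nil => rfl
  | cons a t ih =>
    by_cases h : c a = true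
    · simp [h]
    · simp [h, ih]

theorem pv_findSome?_filter {γ β : Type} (b : γ → Bool) (f : γ → Option β) :
    ∀ L : List γ, (L.filter b).findSome? f = L.findSome? (fun x => if b x then f x else none) := by
  intro L
  induction L with
  | nil => rfl
  | cons a t ih =>
    by_cases h : b a = true
    · rw [List.filter_cons_of_pos h]
      simp only [List.findSome?_cons, if_pos h]
      cases f a <;> simp [ih]
    · rw [List.filter_cons_of_neg (by simp [h])]
      simp only [List.findSome?_cons, if_neg h, ih]

-- the value→indices dictionary of B is a filter of the range -----------------

theorem pv_idx_spec (A : List Int) (v : Int) :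
    ∀ (L : List Int) (d : PySem.Dict Int (List Int)),
      (L.foldl (fun d t => d.modify (PySem.List.pyGetD A t 0) [] (fun b => b ++ [t])) d).getD v []
        = d.getD v [] ++ L.filter (fun t => PySem.List.pyGetD A t 0 == v) := by
  intro L
  induction L with
  | nil => intro d; simp
  | cons a t ih =>
    intro d
    simp only [List.foldl_cons, List.filter_cons]
    rw [ih]
    by_cases h : PySem.List.pyGetD A a 0 = v
    · rw [show (d.modify (PySem.List.pyGetD A a 0) [] (fun b => b ++ [a])).getD v []
            = d.getD v [] ++ [a] from by rw [h, PySem.Dict.getD_modify_self]]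
      simp [h, List.append_assoc]
    · rw [show (d.modify (PySem.List.pyGetD A a 0) [] (fun b => b ++ [a])).getD v []
            = d.getD v [] from PySem.Dict.getD_modify_of_ne d [] _ (fun hc => h hc.symm)]
      simp [h]

-- A's condition, decomposed as B tests it -----------------------------------

theorem pv_cond_eq (A : List Int) {i j k : Int} (hij : i ≠ j) (hki : k ≠ i) (hkj : k ≠ j)
    (l : Int) :
    pvCond A i j k l
      = ((PySem.List.pyGetD A l 0
            == PySem.List.pyGetD A i 0 + PySem.List.pyGetD A j 0 - PySem.List.pyGetD A k 0)
          && (l != i && l != j && l != k)) := by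
  simp only [pvCond]
  rw [Bool.eq_iff_iff]
  simp only [Bool.and_eq_true, beq_iff_eq, bne_iff_ne, ne_eq]
  constructor
  · rintro ⟨⟨⟨⟨⟨⟨hs, _⟩, hkl⟩, _⟩, _⟩, hjl⟩, hil⟩
    exact ⟨by omega, ⟨fun h => hil h.symm, fun h => hjl h.symm⟩, fun h => hkl h.symm⟩
  · rintro ⟨hs, ⟨hli, hlj⟩, hlk⟩
    refine ⟨⟨⟨⟨⟨⟨by omega, hij⟩, fun h => hlk h.symm⟩, fun h => hkj h.symm⟩,
      fun h => hki h.symm⟩, fun h => hlj h.symm⟩, fun h => hli h.symm⟩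

-- the main equivalence ------------------------------------------------------

theorem pv_main (A : List Int) (N : Int) : satisfyEqn A N = satisfyEqn_alt A N := by
  unfold satisfyEqn satisfyEqn_alt
  dsimp only
  generalize PySem.List.pyRange 0 N 1 = r
  have hidx : ∀ v,
      (r.foldl (fun d t => d.modify (PySem.List.pyGetD A t 0) [] (fun b => b ++ [t]))
          (PySem.Dict.empty : PySem.Dict Int (List Int))).getD v []
        = r.filter (fun t => PySem.List.pyGetD A t 0 == v) := by
    intro v; rw [pv_idx_spec]; simp
  simp only [hidx]
  have hmain : r.findSome? (fun i => r.findSome? (fun j => r.findSome? (fun k =>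
        r.findSome? (fun l => if pvCond A i j k l then some [i, j, k, l] else none))))
      = r.findSome? (fun i => r.findSome? (fun j =>
          if i != j then
            r.findSome? (fun k =>
              if k != i && k != j then
                ((r.filter (fun t => PySem.List.pyGetD A t 0
                      == PySem.List.pyGetD A i 0 + PySem.List.pyGetD A j 0
                        - PySem.List.pyGetD A k 0)).find?
                    (fun l => l != i && l != j && l != k)).map (fun l => [i, j, k, l])
              else none)
          else none)) := by
    apply pv_findSome?_congr
    intro i _
    apply pv_findSome?_congr
    intro j _
    by_cases hj : (i != j) = true
    · rw [if_pos hj]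
      have hij : i ≠ j := by simpa using hj
      apply pv_findSome?_congr
      intro k _
      by_cases hk : (k != i && k != j) = true
      · rw [if_pos hk]
        have hki : k ≠ i := by
          have := hk; simp only [Bool.and_eq_true, bne_iff_ne] at this; exact this.1
        have hkj : k ≠ j := by
          have := hk; simp only [Bool.and_eq_true, bne_iff_ne] at this; exact this.2
        rw [pv_find?_map_eq_findSome?, pv_findSome?_filter]
        apply pv_findSome?_congr
        intro l _
        rw [pv_cond_eq A hij hki hkj l]
        by_cases h1 : (PySem.List.pyGetD A l 0
            == PySem.List.pyGetD A i 0 + PySem.List.pyGetD A j 0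
              - PySem.List.pyGetD A k 0) = true
        · rw [if_pos h1]
          by_cases h2 : (l != i && l != j && l != k) = true
          · rw [if_pos (by simp [h1, h2]), if_pos h2]
          · rw [if_neg (by simp [h2]), if_neg h2]
        · rw [if_neg h1, if_neg (by simp [h1])]
      · rw [if_neg hk]
        rw [List.findSome?_eq_none_iff]
        intro l _
        have hkor : k = i ∨ k = j := by
          simp only [Bool.and_eq_true, bne_iff_ne] at hk; tauto
        have : pvCond A i j k l = false := by
          rcases hkor with h | h <;> subst h <;> simp [pvCond]
        simp [this]
    · rw [if_neg hj]
      have hij : i = j := by simpa using hj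
      subst hij
      rw [List.findSome?_eq_none_iff]
      intro k _
      rw [List.findSome?_eq_none_iff]
      intro l _
      have : pvCond A i i k l = false := by simp [pvCond]
      simp [this]
  rw [hmain]

-- ===== VERDICT (by name: the statement is the Claim_ definition above) =====
theorem satisfyEqn_spec : Claim_equal_satisfyEqn := by
  intro A N _ _
  unfold Spec_satisfyEqn
  exact pv_main A N
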